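-- pv_equiv track=rewrite | github.com/Open-BioAI/CellBench | analysis/update_preprocess_hvg_only.py | infer_control_value
-- ===== SOURCE A (Python) =====
-- from typing import Iterable, Optional
--
-- def is_control_perturbation(pert_str: str, delimiter: str = "+") -> bool:
--     """Check if a perturbation is control (all parts are 'control')."""
--     if not pert_str or not isinstance(pert_str, str):
--         return False
--     pert_str = pert_str.strip()
--     if pert_str == "":
--         return False
--     parts = [p.strip().lower() for p in pert_str.split(delimiter)]
--     return all(part == "control" for part in parts if part)
--
-- def infer_control_value(candidates: Iterable[str], delimiter: str = "+") -> Optional[str]: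
--     """
--     Try to infer a control label from the available perturbation names.
--     We require that a rule produces a single match to avoid ambiguity.
--
--     Priority:
--     1. Exact match: "control" or "control+control" (all parts are control)
--     2. Contains control keywords (but only if single match)
--     """
--     candidates_list = list(candidates)
--     normalized = [(val, str(val).lower()) for val in candidates_list]
--
--     # Priority 1: Check for pure control (all parts are "control")
--     pure_controls = [
--         orig for orig, lower in normalized
--         if is_control_perturbation(orig, delimiter)
--     ]
--     if len(pure_controls) == 1:
--         return pure_controls[0]
--     elif len(pure_controls) > 1:
--         # Multiple pure controls, prefer shortest (e.g., "control" over "control+control")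
--         return min(pure_controls, key=len)
--
--     # Priority 2: Check for exact matches with common control keywords
--     rules = [
--         lambda v: v[1] == "control",
--         lambda v: v[1] == "ctrl",
--         lambda v: v[1] == "ntc",
--     ]
--     for rule in rules:
--         matches = [orig for orig, lower in normalized if rule((orig, lower))]
--         if len(matches) == 1:
--             return matches[0]
--
--     # Priority 3: Check for patterns (but only if single match)
--     pattern_rules = [
--         lambda v: v[1].endswith("_ctrl"),
--         lambda v: "ntc" in v[1] and len(v[1]) < 10,  # Short NTC variants
--         lambda v: "mock" in v[1] and len(v[1]) < 10,
--         lambda v: "vehicle" in v[1] and len(v[1]) < 15,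
--         lambda v: "dms0" in v[1],
--         lambda v: "lacz" in v[1] and len(v[1]) < 10,
--     ]
--     for rule in pattern_rules:
--         matches = [orig for orig, lower in normalized if rule((orig, lower))]
--         if len(matches) == 1:
--             return matches[0]
--
--     return None
-- ===== SOURCE B (Python) =====
-- from typing import Iterable, Optional
--
-- def is_control_perturbation(pert_str: str, delimiter: str = "+") -> bool:
--     """Check if a perturbation is control (all parts are 'control')."""
--     if not pert_str or not isinstance(pert_str, str):
--         return False
--     pert_str = pert_str.strip()
--     if pert_str == "":
--         return False
--     parts = [p.strip().lower() for p in pert_str.split(delimiter)]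
--     return all(part == "control" for part in parts if part)
--
-- def infer_control_value(candidates: Iterable[str], delimiter: str = "+") -> Optional[str]:
--     """One pass over the candidates fills a bucket per rule; then a decision
--     phase picks the answer in rule-priority order."""
--     keywords = ("control", "ctrl", "ntc")
--     pure = []
--     buckets = [[] for _ in range(9)]  # 3 keyword rules + 6 pattern rules
--     for val in candidates:
--         low = str(val).lower()
--         if is_control_perturbation(val, delimiter):
--             pure.append(val)
--         flags = (
--             low == keywords[0],
--             low == keywords[1],
--             low == keywords[2],
--             low.endswith("_ctrl"),
--             "ntc" in low and len(low) < 10,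
--             "mock" in low and len(low) < 10,
--             "vehicle" in low and len(low) < 15,
--             "dms0" in low,
--             "lacz" in low and len(low) < 10,
--         )
--         for i, f in enumerate(flags):
--             if f:
--                 buckets[i].append(val)
--     if len(pure) == 1:
--         return pure[0]
--     if len(pure) > 1:
--         return min(pure, key=len)
--     for b in buckets:
--         if len(b) == 1:
--             return b[0]
--     return None
-- ===== Notes on version B (the rewrite author's own statement) =====
-- stated objective: alternative
-- what changed: B replaces A's nine separate filtering passes over the normalized list (one per rule) by a single pass that buckets every candidate under all ten rules at once, followed by a pure decision phase over the buckets.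
import Mathlib
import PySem

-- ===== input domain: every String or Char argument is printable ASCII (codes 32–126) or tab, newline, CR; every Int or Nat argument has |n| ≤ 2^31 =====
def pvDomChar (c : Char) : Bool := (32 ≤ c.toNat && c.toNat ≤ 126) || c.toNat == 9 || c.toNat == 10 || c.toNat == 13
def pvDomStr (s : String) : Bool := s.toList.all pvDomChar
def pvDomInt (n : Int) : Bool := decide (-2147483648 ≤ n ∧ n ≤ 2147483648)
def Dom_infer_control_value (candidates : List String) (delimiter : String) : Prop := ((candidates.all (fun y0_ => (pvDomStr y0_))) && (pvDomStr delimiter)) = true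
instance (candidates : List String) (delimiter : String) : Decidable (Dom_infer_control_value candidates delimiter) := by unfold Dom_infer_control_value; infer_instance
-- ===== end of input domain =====

-- B buckets every candidate under all ten rules in ONE pass, then decides; A re-filters the list once per rule.


-- ===== PORT A =====
-- shared module helper (used verbatim by both Pythons); split? = none exactly where
-- Python str.split raises (delimiter = ""), those inputs are excluded by Pre_ below
def is_control_perturbation (pert_str : String) (delimiter : String) : Bool :=
  if pert_str == "" then false          -- 'not pert_str'; isinstance(·, str) is always true here
  else
    let s := PySem.Str.strip pert_str
    if s == "" then false
    else
      let parts := ((PySem.Str.split? s delimiter).getD []).map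
        (fun p => PySem.Str.lower (PySem.Str.strip p))
      (parts.filter (fun p => !(p == ""))).all (fun p => p == "control")

-- 'for rule in rules: matches = [...]; if len(matches) == 1: return matches[0]'
def icvTryRules (normalized : List (String × String)) : List ((String × String) → Bool) → Option String
  | [] => none
  | r :: rs =>
    let ms := (normalized.filter r).map (·.1)
    if ms.length == 1 then ms[0]? else icvTryRules normalized rs

def infer_control_value (candidates : List String) (delimiter : String) : Option String :=
  let normalized := candidates.map (fun v => (v, PySem.Str.lower v))
  let pure_controls := (normalized.filter (fun p => is_control_perturbation p.1 delimiter)).map (·.1)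
  if pure_controls.length == 1 then pure_controls[0]?
  else if pure_controls.length > 1 then
    PySem.List.min? pure_controls (fun s => PySem.Str.len s)   -- min(pure_controls, key=len)
  else
    let rules : List ((String × String) → Bool) :=
      [ fun v => v.2 == "control", fun v => v.2 == "ctrl", fun v => v.2 == "ntc" ]
    match icvTryRules normalized rules with
    | some m => some m
    | none =>
      let pattern_rules : List ((String × String) → Bool) :=
        [ fun v => PySem.Str.endswith v.2 "_ctrl",
          fun v => PySem.Str.isIn "ntc" v.2 && decide (PySem.Str.len v.2 < 10),
          fun v => PySem.Str.isIn "mock" v.2 && decide (PySem.Str.len v.2 < 10),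
          fun v => PySem.Str.isIn "vehicle" v.2 && decide (PySem.Str.len v.2 < 15),
          fun v => PySem.Str.isIn "dms0" v.2,
          fun v => PySem.Str.isIn "lacz" v.2 && decide (PySem.Str.len v.2 < 10) ]
      icvTryRules normalized pattern_rules

-- ===== PORT B =====
structure IcvBuckets where
  pure : List String
  b1 : List String
  b2 : List String
  b3 : List String
  b4 : List String
  b5 : List String
  b6 : List String
  b7 : List String
  b8 : List String
  b9 : List String
deriving Repr

-- one candidate: append it to the bucket of every rule it matches
def icvStep (delimiter : String) (st : IcvBuckets) (val : String) : IcvBuckets :=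
  let low := PySem.Str.lower val
  { pure := st.pure ++ (if is_control_perturbation val delimiter then [val] else []),
    b1 := st.b1 ++ (if low == "control" then [val] else []),
    b2 := st.b2 ++ (if low == "ctrl" then [val] else []),
    b3 := st.b3 ++ (if low == "ntc" then [val] else []),
    b4 := st.b4 ++ (if PySem.Str.endswith low "_ctrl" then [val] else []),
    b5 := st.b5 ++ (if PySem.Str.isIn "ntc" low && decide (PySem.Str.len low < 10) then [val] else []),
    b6 := st.b6 ++ (if PySem.Str.isIn "mock" low && decide (PySem.Str.len low < 10) then [val] else []),
    b7 := st.b7 ++ (if PySem.Str.isIn "vehicle" low && decide (PySem.Str.len low < 15) then [val] else []),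
    b8 := st.b8 ++ (if PySem.Str.isIn "dms0" low then [val] else []),
    b9 := st.b9 ++ (if PySem.Str.isIn "lacz" low && decide (PySem.Str.len low < 10) then [val] else []) }

-- 'for b in buckets: if len(b) == 1: return b[0]'
def icvDecide : List (List String) → Option String
  | [] => none
  | b :: bs => if b.length == 1 then b[0]? else icvDecide bs

def infer_control_value_alt (candidates : List String) (delimiter : String) : Option String :=
  let st := candidates.foldl (icvStep delimiter) ⟨[], [], [], [], [], [], [], [], [], []⟩
  if st.pure.length == 1 then st.pure[0]?
  else if st.pure.length > 1 then PySem.List.min? st.pure (fun s => PySem.Str.len s)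
  else icvDecide [st.b1, st.b2, st.b3, st.b4, st.b5, st.b6, st.b7, st.b8, st.b9]

-- ===== PRECONDITION & SPEC =====
-- Pre_ excludes exactly the inputs where the Python A raises ValueError: delimiter = ""
-- reaching str.split (i.e. some candidate whose strip is non-empty); B raises there too.
def Pre_infer_control_value (candidates : List String) (delimiter : String) : Prop :=
  delimiter ≠ "" ∨ ∀ c ∈ candidates, PySem.Str.strip c = ""
instance (candidates : List String) (delimiter : String) : Decidable (Pre_infer_control_value candidates delimiter) := by
  unfold Pre_infer_control_value; infer_instance
def pvWitness_infer_control_value : List String × String := (["control", "geneA"], "+")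

def Spec_infer_control_value (candidates : List String) (delimiter : String) (out : Option String) : Prop := out = infer_control_value_alt candidates delimiter
instance (candidates : List String) (delimiter : String) (out : Option String) : Decidable (Spec_infer_control_value candidates delimiter out) := by unfold Spec_infer_control_value; infer_instance

-- ===== CLAIM (what is proved, stated in full; the proofs are below) =====
def Claim_equal_infer_control_value : Prop := ∀ (candidates : List String) (delimiter : String), Dom_infer_control_value candidates delimiter → Pre_infer_control_value candidates delimiter → Spec_infer_control_value candidates delimiter (infer_control_value candidates delimiter)

-- ===== LEMMAS AND PROOFS =====
-- B's one-pass fold fills each bucket with exactly the filter of its rule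
theorem icv_foldl_step (delimiter : String) (xs : List String) (st : IcvBuckets) :
    xs.foldl (icvStep delimiter) st =
      { pure := st.pure ++ xs.filter (fun v => is_control_perturbation v delimiter),
        b1 := st.b1 ++ xs.filter (fun v => PySem.Str.lower v == "control"),
        b2 := st.b2 ++ xs.filter (fun v => PySem.Str.lower v == "ctrl"),
        b3 := st.b3 ++ xs.filter (fun v => PySem.Str.lower v == "ntc"),
        b4 := st.b4 ++ xs.filter (fun v => PySem.Str.endswith (PySem.Str.lower v) "_ctrl"),
        b5 := st.b5 ++ xs.filter (fun v => PySem.Str.isIn "ntc" (PySem.Str.lower v) && decide (PySem.Str.len (PySem.Str.lower v) < 10)),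
        b6 := st.b6 ++ xs.filter (fun v => PySem.Str.isIn "mock" (PySem.Str.lower v) && decide (PySem.Str.len (PySem.Str.lower v) < 10)),
        b7 := st.b7 ++ xs.filter (fun v => PySem.Str.isIn "vehicle" (PySem.Str.lower v) && decide (PySem.Str.len (PySem.Str.lower v) < 15)),
        b8 := st.b8 ++ xs.filter (fun v => PySem.Str.isIn "dms0" (PySem.Str.lower v)),
        b9 := st.b9 ++ xs.filter (fun v => PySem.Str.isIn "lacz" (PySem.Str.lower v) && decide (PySem.Str.len (PySem.Str.lower v) < 10)) } := by
  induction xs generalizing st with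
  | nil => simp
  | cons x t ih =>
    simp only [List.foldl_cons, ih, icvStep, List.filter_cons]
    simp only [IcvBuckets.mk.injEq, List.append_assoc, List.append_cancel_left_eq]
    and_intros <;> (split <;> simp_all)

-- A's two sequential rule loops are the loop over the concatenated rule list
theorem icv_tryRules_append (n : List (String × String))
    (rs1 rs2 : List ((String × String) → Bool)) :
    (match icvTryRules n rs1 with
     | some m => some m
     | none => icvTryRules n rs2) = icvTryRules n (rs1 ++ rs2) := by
  induction rs1 with
  | nil => simp [icvTryRules]
  | cons r rs ih =>
    simp only [List.cons_append, icvTryRules]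
    by_cases hc : ((n.filter r).map (·.1)).length = 1
    · obtain ⟨m, hm⟩ := List.length_eq_one_iff.mp hc
      simp [hm]
    · simp only [beq_iff_eq, hc, if_false]
      exact ih

-- ===== VERDICT (by name: the statement is the Claim_ definition above) =====
theorem infer_control_value_spec : Claim_equal_infer_control_value := by
  intro candidates delimiter _ _
  unfold Spec_infer_control_value infer_control_value infer_control_value_alt
  simp only [icv_foldl_step, List.nil_append]
  rw [icv_tryRules_append]
  simp only [icvTryRules, icvDecide, List.cons_append, List.nil_append,
    List.filter_map, List.map_map, Function.comp_def, List.map_id']
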